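-- pv_equiv track=rewrite | github.com/vickyarp/DanceMoves | dash-player/utils.py | angles_to_ids
-- ===== SOURCE A (Python) =====
-- BODYPART_INDEX = {
--     0: 'nose_to_neck_to_left_shoulder',
--     1: 'nose_to_neck_to_right_shoulder',
--     2: 'left_shoulder_to_right_shoulder',
--     3: 'left_shoulder_to_left_upper_arm',
--     4: 'left_lower_arm_to_left_upper_arm',
--     5: 'right_upper_arm_to_right_shoulder',
--     6: 'right_upper_arm_to_right_lower_arm',
--     7: 'left_eye_to_nose_to_left_ear_to_eye',
--     8: 'left_eye_to_nose_to_neck',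
--     9: 'nose_to_neck_to_right_eye_to_nose',
--     10: 'left_eye_to_nose_to_right_ear_to_eye',
--     11: 'right_eye_to_nose_to_right_ear_to_eye',
--     12: 'right_hip_to_right_upper_leg',
--     13: 'right_upper_leg_to_right_lower_leg',
--     14: 'left_hip_to_left_upper_leg',
--     15: 'left_upper_leg_to_left_lower_leg',
--     16: 'left_lower_leg_left_ankle_to_heel',
--     17: 'right_lower_leg_to_right_ankle_to_heel',
--     18: 'right_foot_to_right_toes',
--     19: 'right_foot_to_right_lower_leg',
--     20: 'right_foot_to_right_ankle_to_heel',
--     21: 'left_foot_to_left_lower_leg',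
--     22: 'left_foot_to_left_ankle_to_heel',
--     23: 'left_foot_to_left_toes',
--     24: 'torso_to_right_shoulder',
--     25: 'torso_to_left_shoulder',
--     26: 'torso_to_nose_to_neck',
--     27: 'torso_to_right_hip',
--     28: 'torso_to_left_hip'
-- }
--
-- def angles_to_ids(angle_names=[]):
--     ids = []
--     for angle_name in angle_names:
--         for key, value in BODYPART_INDEX.items():
--             if angle_name == value:
--                 ids.append(key)
--     ids.sort()
--     return ids
-- ===== SOURCE B (Python) =====
-- NAME_TO_ID = {
--     'nose_to_neck_to_left_shoulder': 0,
--     'nose_to_neck_to_right_shoulder': 1,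
--     'left_shoulder_to_right_shoulder': 2,
--     'left_shoulder_to_left_upper_arm': 3,
--     'left_lower_arm_to_left_upper_arm': 4,
--     'right_upper_arm_to_right_shoulder': 5,
--     'right_upper_arm_to_right_lower_arm': 6,
--     'left_eye_to_nose_to_left_ear_to_eye': 7,
--     'left_eye_to_nose_to_neck': 8,
--     'nose_to_neck_to_right_eye_to_nose': 9,
--     'left_eye_to_nose_to_right_ear_to_eye': 10,
--     'right_eye_to_nose_to_right_ear_to_eye': 11,
--     'right_hip_to_right_upper_leg': 12,
--     'right_upper_leg_to_right_lower_leg': 13,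
--     'left_hip_to_left_upper_leg': 14,
--     'left_upper_leg_to_left_lower_leg': 15,
--     'left_lower_leg_left_ankle_to_heel': 16,
--     'right_lower_leg_to_right_ankle_to_heel': 17,
--     'right_foot_to_right_toes': 18,
--     'right_foot_to_right_lower_leg': 19,
--     'right_foot_to_right_ankle_to_heel': 20,
--     'left_foot_to_left_lower_leg': 21,
--     'left_foot_to_left_ankle_to_heel': 22,
--     'left_foot_to_left_toes': 23,
--     'torso_to_right_shoulder': 24,
--     'torso_to_left_shoulder': 25,
--     'torso_to_nose_to_neck': 26,
--     'torso_to_right_hip': 27,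
--     'torso_to_left_hip': 28
-- }
--
--
-- def angles_to_ids(angle_names=[]):
--     # Counting pass over the names, then one walk over the reverse map
--     # NAME_TO_ID (its values are ascending), emitting each id once per
--     # occurrence of its name: no per-name scan of the table, no final sort.
--     counts = {}
--     for name in angle_names:
--         counts[name] = counts.get(name, 0) + 1
--     ids = []
--     for name, key in NAME_TO_ID.items():
--         ids.extend([key] * counts.get(name, 0))
--     return ids
-- ===== Notes on version B (the rewrite author's own statement) =====
-- stated objective: faster
-- what changed: Replaces the per-name scan over the dict plus a final sort by a counting pass: build a counter of the requested names once, then walk a reverse name-to-id map once in its insertion (ascending-id) order emitting each id with its multiplicity, so the result comes out already sorted and no sort is performed.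
import Mathlib
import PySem

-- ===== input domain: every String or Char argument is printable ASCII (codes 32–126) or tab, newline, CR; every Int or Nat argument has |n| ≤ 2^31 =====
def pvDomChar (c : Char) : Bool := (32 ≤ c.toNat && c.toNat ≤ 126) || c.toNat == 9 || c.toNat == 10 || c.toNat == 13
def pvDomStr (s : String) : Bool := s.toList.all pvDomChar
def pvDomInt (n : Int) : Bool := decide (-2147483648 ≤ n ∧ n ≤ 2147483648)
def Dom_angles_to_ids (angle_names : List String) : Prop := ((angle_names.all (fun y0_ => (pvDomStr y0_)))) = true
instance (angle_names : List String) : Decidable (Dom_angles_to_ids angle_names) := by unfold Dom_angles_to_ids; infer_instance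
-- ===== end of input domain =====

-- B replaces A's per-name dict scan + final sort by one counting pass over the names and one
-- emission pass over a reverse name-to-id map in ascending-id order (result already sorted);
-- same return value everywhere.

-- ===== PORT A =====
def pvBody : List (Int × String) := [(0, "nose_to_neck_to_left_shoulder"), (1, "nose_to_neck_to_right_shoulder"), (2, "left_shoulder_to_right_shoulder"), (3, "left_shoulder_to_left_upper_arm"), (4, "left_lower_arm_to_left_upper_arm"), (5, "right_upper_arm_to_right_shoulder"), (6, "right_upper_arm_to_right_lower_arm"), (7, "left_eye_to_nose_to_left_ear_to_eye"), (8, "left_eye_to_nose_to_neck"), (9, "nose_to_neck_to_right_eye_to_nose"), (10, "left_eye_to_nose_to_right_ear_to_eye"), (11, "right_eye_to_nose_to_right_ear_to_eye"), (12, "right_hip_to_right_upper_leg"), (13, "right_upper_leg_to_right_lower_leg"), (14, "left_hip_to_left_upper_leg"), (15, "left_upper_leg_to_left_lower_leg"), (16, "left_lower_leg_left_ankle_to_heel"), (17, "right_lower_leg_to_right_ankle_to_heel"), (18, "right_foot_to_right_toes"), (19, "right_foot_to_right_lower_leg"), (20, "right_foot_to_right_ankle_to_heel"), (21, "left_foot_to_left_lower_leg"),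 (22, "left_foot_to_left_ankle_to_heel"), (23, "left_foot_to_left_toes"), (24, "torso_to_right_shoulder"), (25, "torso_to_left_shoulder"), (26, "torso_to_nose_to_neck"), (27, "torso_to_right_hip"), (28, "torso_to_left_hip")]

def BODYPART_INDEX : PySem.Dict Int String := PySem.Dict.ofList pvBody

def angles_to_ids (angle_names : List String) : List Int :=
  let ids : List Int :=
    angle_names.foldl (fun ids angle_name =>
      BODYPART_INDEX.items.foldl (fun ids kv =>
        if angle_name == kv.2 then ids ++ [kv.1] else ids) ids) []
  PySem.List.sorted ids (fun x => x) false

-- ===== PORT B =====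
def pvRev : List (String × Int) := [("nose_to_neck_to_left_shoulder", 0), ("nose_to_neck_to_right_shoulder", 1), ("left_shoulder_to_right_shoulder", 2), ("left_shoulder_to_left_upper_arm", 3), ("left_lower_arm_to_left_upper_arm", 4), ("right_upper_arm_to_right_shoulder", 5), ("right_upper_arm_to_right_lower_arm", 6), ("left_eye_to_nose_to_left_ear_to_eye", 7), ("left_eye_to_nose_to_neck", 8), ("nose_to_neck_to_right_eye_to_nose", 9), ("left_eye_to_nose_to_right_ear_to_eye", 10), ("right_eye_to_nose_to_right_ear_to_eye", 11), ("right_hip_to_right_upper_leg", 12), ("right_upper_leg_to_right_lower_leg", 13), ("left_hip_to_left_upper_leg", 14), ("left_upper_leg_to_left_lower_leg", 15), ("left_lower_leg_left_ankle_to_heel", 16), ("right_lower_leg_to_right_ankle_to_heel", 17), ("right_foot_to_right_toes", 18), ("right_foot_to_right_lower_leg", 19), ("right_foot_to_right_ankle_to_heel", 20), ("left_foot_to_left_lower_leg", 21), ("left_foot_to_left_ankle_to_heel", 22), ("left_foot_to_left_toes", 23), ("torso_to_right_shoulder", 24), ("torso_to_left_shoulder", 25), ("torso_to_nose_to_neck",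 26), ("torso_to_right_hip", 27), ("torso_to_left_hip", 28)]

def NAME_TO_ID : PySem.Dict String Int := PySem.Dict.ofList pvRev

-- the second loop of Source B: walk the reverse map, extending ids by key repeated count-of-name times
def pvEmit : List (String × Int) → PySem.Dict String Int → List Int
  | [], _ => []
  | (name, key) :: rest, counts =>
      List.replicate (counts.getD name 0).toNat key ++ pvEmit rest counts

def angles_to_ids_alt (angle_names : List String) : List Int :=
  let counts : PySem.Dict String Int :=
    angle_names.foldl (fun d name => d.insert name (d.getD name 0 + 1)) PySem.Dict.empty
  pvEmit NAME_TO_ID.items counts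

-- ===== PRECONDITION & SPEC =====
def Spec_angles_to_ids (angle_names : List String) (out : List Int) : Prop := out = angles_to_ids_alt angle_names
instance (angle_names : List String) (out : List Int) : Decidable (Spec_angles_to_ids angle_names out) := by unfold Spec_angles_to_ids; infer_instance

-- ===== CLAIM (what is proved, stated in full; the proofs are below) =====
def Claim_equal_angles_to_ids : Prop := ∀ (angle_names : List String), Dom_angles_to_ids angle_names → Spec_angles_to_ids angle_names (angles_to_ids angle_names)

-- ===== LEMMAS AND PROOFS =====

lemma items_body : BODYPART_INDEX.items = pvBody := by decide

lemma items_rev : NAME_TO_ID.items = pvRev := by decide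

lemma rev_swap : pvRev.map (fun p => (p.2, p.1)) = pvBody := by decide

-- the matches one name contributes in A
def pvMatch (L : List (Int × String)) (n : String) : List Int :=
  (L.filter (fun p => n == p.2)).map (·.1)

-- block emission by multiplicity over the forward table
def pvBlocks (L : List (Int × String)) (cnt : String → Nat) : List Int :=
  L.flatMap (fun p => List.replicate (cnt p.2) p.1)

lemma swap_perm {a b c : List Int} : (a ++ (b ++ c)).Perm (b ++ (a ++ c)) := by
  rw [← List.append_assoc, ← List.append_assoc]
  exact List.perm_append_comm.append_right c

lemma blocks_cons (L : List (Int × String)) (n : String) (names : List String) :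
    (pvBlocks L (fun v => (n :: names).count v)).Perm
      (pvMatch L n ++ pvBlocks L (fun v => names.count v)) := by
  induction L with
  | nil => simp [pvBlocks, pvMatch]
  | cons p L ih =>
    by_cases h : (n == p.2)
    · have hv : p.2 = n := ((beq_iff_eq).mp h).symm
      simp only [pvBlocks, pvMatch, List.flatMap_cons, List.filter_cons, h, if_pos,
        List.map_cons] at *
      rw [hv, List.count_cons_self, List.replicate_succ, List.cons_append]
      exact List.Perm.cons _ ((ih.append_left _).trans swap_perm)
    · have hv : p.2 ≠ n := fun e => h (by simp [e])
      simp only [pvBlocks, pvMatch, List.flatMap_cons, List.filter_cons, h,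
        Bool.false_eq_true, if_false] at *
      rw [List.count_cons_of_ne (Ne.symm hv)]
      exact (ih.append_left _).trans swap_perm

lemma blocks_perm (L : List (Int × String)) (names : List String) :
    (pvBlocks L (fun v => names.count v)).Perm (names.flatMap (pvMatch L)) := by
  induction names with
  | nil => simp [pvBlocks]
  | cons n names ih =>
    exact (blocks_cons L n names).trans (ih.append_left _)

lemma blocks_pairwise (L : List (Int × String)) (cnt : String → Nat)
    (h : (L.map (·.1)).Pairwise (· ≤ ·)) :
    (pvBlocks L cnt).Pairwise (· ≤ ·) := by
  induction L with
  | nil => simp [pvBlocks]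
  | cons p L ih =>
    simp only [List.map_cons, List.pairwise_cons] at h
    simp only [pvBlocks, List.flatMap_cons]
    rw [List.pairwise_append]
    refine ⟨List.pairwise_replicate.mpr (Or.inr le_rfl), ih h.2, ?_⟩
    intro x hx y hy
    rw [List.eq_of_mem_replicate hx]
    rcases List.mem_flatMap.mp hy with ⟨q, hq, hyq⟩
    rw [List.eq_of_mem_replicate hyq]
    exact h.1 q.1 (List.mem_map_of_mem hq)

lemma body_keys_mono : (pvBody.map (·.1)).Pairwise (· ≤ ·) := by decide

lemma A_eq (names : List String) :
    angles_to_ids names =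
      PySem.List.sorted (names.flatMap (pvMatch pvBody)) (fun x => x) false := by
  simp only [angles_to_ids, items_body]
  congr 1
  calc names.foldl (fun ids angle_name =>
        pvBody.foldl (fun ids kv => if angle_name == kv.2 then ids ++ [kv.1] else ids) ids) []
      = names.foldl (fun acc n => acc ++ pvMatch pvBody n) [] := by
        apply PySem.List.foldl_congr_mem
        intro acc n _
        exact PySem.List.foldl_append_if (l := pvBody) (p := fun kv => n == kv.2)
          (f := (·.1)) (acc := acc)
    _ = [] ++ names.flatMap (pvMatch pvBody) := PySem.List.foldl_append_eq_flatMap _ _ _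
    _ = names.flatMap (pvMatch pvBody) := List.nil_append _

lemma emit_eq_blocks (L : List (String × Int)) (d : PySem.Dict String Int) :
    pvEmit L d = pvBlocks (L.map (fun p => (p.2, p.1))) (fun v => (d.getD v 0).toNat) := by
  induction L with
  | nil => simp [pvEmit, pvBlocks]
  | cons p L ih => simp [pvEmit, pvBlocks, ih]

lemma B_eq (names : List String) :
    angles_to_ids_alt names = pvBlocks pvBody (fun v => names.count v) := by
  simp only [angles_to_ids_alt, items_rev]
  rw [emit_eq_blocks, rev_swap]
  congr 1
  funext v
  rw [PySem.Dict.getD_foldl_insert_add_one, PySem.Dict.getD_empty]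
  simp

-- ===== VERDICT (by name: the statement is the Claim_ definition above) =====
theorem angles_to_ids_spec : Claim_equal_angles_to_ids := by
  intro names _
  unfold Spec_angles_to_ids
  rw [A_eq, B_eq]
  exact PySem.List.sorted_id_eq_of_perm_of_pairwise _ _
    (blocks_perm pvBody names)
    (blocks_pairwise pvBody _ body_keys_mono)
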